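-- pv_equiv track=rewrite | github.com/scottmccrimmon/autonomous-coding-agent | harness/loop.py | parse_files_from_response
-- ===== SOURCE A (Python) =====
-- def parse_files_from_response(response: str) -> list:
--     """
--     Extract FILE: sentinel blocks from the agent Act response.
--
--     Expected format in the response:
--         FILE: path/to/file.py
--         <file contents>
--         FILE: path/to/another.py
--         <file contents>
--
--     Returns a list of (relative_path, content) tuples.
--     """
--     files = []
--     current_path = None
--     current_lines = []
--
--     for line in response.splitlines():
--         if line.startswith("FILE:"):
--             if current_path is not None:
--                 files.append((current_path, "\n".join(current_lines).rstrip()))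
--             current_path = line.replace("FILE:", "").strip()
--             current_lines = []
--         else:
--             if current_path is not None:
--                 current_lines.append(line)
--
--     # Capture the final file block
--     if current_path is not None:
--         files.append((current_path, "\n".join(current_lines).rstrip()))
--
--     return files
-- ===== SOURCE B (Python) =====
-- def parse_files_from_response(response: str) -> list:
--     """Extract FILE: sentinel blocks as (path, content) tuples.
--
--     Block-splitting decomposition: skip the preamble before the first
--     'FILE:' line, then repeatedly scan to the next 'FILE:' boundary and
--     slice out each block, instead of folding a (path, lines) state.
--     """
--     lines = response.splitlines()
--     n = len(lines)
--     i = 0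
--     while i < n and not lines[i].startswith("FILE:"):
--         i += 1
--     files = []
--     while i < n:
--         j = i + 1
--         while j < n and not lines[j].startswith("FILE:"):
--             j += 1
--         path = lines[i].replace("FILE:", "").strip()
--         content = "\n".join(lines[i + 1:j]).rstrip()
--         files.append((path, content))
--         i = j
--     return files
-- ===== Notes on version B (the rewrite author's own statement) =====
-- stated objective: alternative
-- what changed: Replaces A's single stateful fold carrying (current_path, current_lines) accumulators with a block-splitting scan: skip the preamble, then repeatedly find the next FILE: boundary and slice out (path, body) per block.
import Mathlib
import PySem

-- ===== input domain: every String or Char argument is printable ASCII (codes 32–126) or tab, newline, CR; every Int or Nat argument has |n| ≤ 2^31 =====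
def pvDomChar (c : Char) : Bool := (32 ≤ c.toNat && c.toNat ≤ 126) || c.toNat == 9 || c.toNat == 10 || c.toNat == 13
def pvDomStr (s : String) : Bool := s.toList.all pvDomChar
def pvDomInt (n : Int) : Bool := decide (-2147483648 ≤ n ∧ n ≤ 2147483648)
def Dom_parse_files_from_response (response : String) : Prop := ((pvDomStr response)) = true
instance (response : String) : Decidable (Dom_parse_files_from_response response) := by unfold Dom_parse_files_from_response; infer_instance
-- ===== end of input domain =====

-- B splits the line list into blocks at the 'FILE:' boundaries instead of folding a
-- (files, current_path, current_lines) state over the lines; same return value, same cost.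

-- ===== PORT A =====
-- state = (files, current_path, current_lines)
def pvStepA (st : List (String × String) × Option String × List String) (line : String) :
    List (String × String) × Option String × List String :=
  if PySem.Str.startswith line "FILE:" then
    ((match st.2.1 with
      | some p => st.1 ++ [(p, PySem.Str.rstrip (PySem.Str.join "\n" st.2.2))]
      | none => st.1),
     some (PySem.Str.strip (PySem.Str.replace line "FILE:" "")), [])
  else
    match st.2.1 with
    | some _ => (st.1, st.2.1, st.2.2 ++ [line])
    | none => st

-- the trailing 'if current_path is not None: files.append(…)'
def pvFinA (st : List (String × String) × Option String × List String) :
    List (String × String) :=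
  match st.2.1 with
  | some p => st.1 ++ [(p, PySem.Str.rstrip (PySem.Str.join "\n" st.2.2))]
  | none => st.1

def parse_files_from_response (response : String) : List (String × String) :=
  pvFinA ((PySem.Str.splitlines response).foldl pvStepA ([], none, []))

-- ===== PORT B =====
def pvIsFile (l : String) : Bool := PySem.Str.startswith l "FILE:"

-- the inner 'while j < n and not lines[j].startswith(...)' scan + slice, repeated
def pvBlocks : List String → List (String × String)
  | [] => []
  | h :: rest =>
    (PySem.Str.strip (PySem.Str.replace h "FILE:" ""),
     PySem.Str.rstrip (PySem.Str.join "\n" (rest.takeWhile (fun l => !pvIsFile l)))) ::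
      pvBlocks (rest.dropWhile (fun l => !pvIsFile l))
  termination_by ls => ls.length
  decreasing_by
    exact Nat.lt_succ_of_le (List.length_dropWhile_le _ _)

def parse_files_from_response_alt (response : String) : List (String × String) :=
  pvBlocks ((PySem.Str.splitlines response).dropWhile (fun l => !pvIsFile l))

-- ===== PRECONDITION & SPEC =====
def Spec_parse_files_from_response (response : String) (out : List (String × String)) : Prop := out = parse_files_from_response_alt response
instance (response : String) (out : List (String × String)) : Decidable (Spec_parse_files_from_response response out) := by unfold Spec_parse_files_from_response; infer_instance

-- ===== CLAIM (what is proved, stated in full; the proofs are below) =====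
def Claim_equal_parse_files_from_response : Prop := ∀ (response : String), Dom_parse_files_from_response response → Spec_parse_files_from_response response (parse_files_from_response response)

-- ===== LEMMAS AND PROOFS =====

lemma pvBlocks_nil : pvBlocks [] = [] := by rw [pvBlocks.eq_def]

lemma pvBlocks_cons (h : String) (rest : List String) :
    pvBlocks (h :: rest) =
      (PySem.Str.strip (PySem.Str.replace h "FILE:" ""),
       PySem.Str.rstrip (PySem.Str.join "\n" (rest.takeWhile (fun l => !pvIsFile l)))) ::
        pvBlocks (rest.dropWhile (fun l => !pvIsFile l)) := by
  rw [pvBlocks.eq_def]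

lemma stepA_pos (fs : List (String × String)) (cp : Option String) (cur : List String)
    (l : String) (h : pvIsFile l = true) :
    pvStepA (fs, cp, cur) l =
      ((match cp with
        | some p => fs ++ [(p, PySem.Str.rstrip (PySem.Str.join "\n" cur))]
        | none => fs),
       some (PySem.Str.strip (PySem.Str.replace l "FILE:" "")), []) := by
  simp only [pvIsFile] at h
  simp only [pvStepA, h, if_true]

lemma stepA_neg (fs : List (String × String)) (cp : Option String) (cur : List String)
    (l : String) (h : pvIsFile l = false) :
    pvStepA (fs, cp, cur) l =
      match cp with
      | some _ => (fs, cp, cur ++ [l])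
      | none => (fs, cp, cur) := by
  simp only [pvIsFile] at h
  simp only [pvStepA, h, Bool.false_eq_true, if_false]

-- loop invariant with an open file block: the pending block closes at the next boundary
lemma foldA_some (lines : List String) (fs : List (String × String)) (p : String)
    (cur : List String) :
    pvFinA (lines.foldl pvStepA (fs, some p, cur)) =
      fs ++ (p, PySem.Str.rstrip (PySem.Str.join "\n"
                (cur ++ lines.takeWhile (fun l => !pvIsFile l)))) ::
        pvBlocks (lines.dropWhile (fun l => !pvIsFile l)) := by
  induction lines generalizing fs p cur with
  | nil => simp [pvFinA, pvBlocks_nil]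
  | cons l rest ih =>
    rw [List.foldl_cons]
    by_cases h : pvIsFile l = true
    · rw [stepA_pos _ _ _ _ h, ih,
        List.takeWhile_cons_of_neg (by simp [h]),
        List.dropWhile_cons_of_neg (by simp [h]), pvBlocks_cons]
      simp
    · rw [Bool.not_eq_true] at h
      rw [stepA_neg _ _ _ _ h, ih,
        List.takeWhile_cons_of_pos (by simp [h]),
        List.dropWhile_cons_of_pos (by simp [h])]
      simp

-- loop invariant with no open block (the preamble before the first 'FILE:' line)
lemma foldA_none (lines : List String) (fs : List (String × String)) :
    pvFinA (lines.foldl pvStepA (fs, none, [])) =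
      fs ++ pvBlocks (lines.dropWhile (fun l => !pvIsFile l)) := by
  induction lines generalizing fs with
  | nil => simp [pvFinA, pvBlocks_nil]
  | cons l rest ih =>
    rw [List.foldl_cons]
    by_cases h : pvIsFile l = true
    · rw [stepA_pos _ _ _ _ h, foldA_some,
        List.dropWhile_cons_of_neg (by simp [h]), pvBlocks_cons]
      simp
    · rw [Bool.not_eq_true] at h
      rw [stepA_neg _ _ _ _ h, ih,
        List.dropWhile_cons_of_pos (by simp [h])]

-- ===== VERDICT (by name: the statement is the Claim_ definition above) =====
theorem parse_files_from_response_spec : Claim_equal_parse_files_from_response := by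
  intro response _
  unfold Spec_parse_files_from_response parse_files_from_response parse_files_from_response_alt
  simpa using foldA_none (PySem.Str.splitlines response) []
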